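-- pv_equiv track=rewrite | github.com/arshiya-salehi/University-Web-Engine | M3/SRC/duplicate_detector.py | compute_signature
-- ===== SOURCE A (Python) =====
-- def compute_signature(tokens, window_size=10):
--     """
--     Compute shingling signature for near-duplicate detection
--     Uses shingles (n-grams) of tokens
--     """
--     if len(tokens) < window_size:
--         return set([tuple(tokens)])
--
--     shingles = set()
--     for i in range(len(tokens) - window_size + 1):
--         shingle = tuple(tokens[i:i + window_size])
--         shingles.add(shingle)
--
--     return frozenset(shingles)
-- ===== SOURCE B (Python) =====
-- def compute_signature(tokens, window_size=10):
--     """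
--     Compute shingling signature for near-duplicate detection.
--     Single pass with a rolling window accumulator: start from the first
--     window, then for each further token slide the window by dropping its
--     first element and appending the token, recording each window as it
--     forms — no per-index slicing.
--     """
--     if len(tokens) < window_size:
--         return set([tuple(tokens)])
--     window = list(tokens[:window_size])
--     shingles = {tuple(window)}
--     for tok in tokens[window_size:]:
--         window.pop(0)
--         window.append(tok)
--         shingles.add(tuple(window))
--     return frozenset(shingles)
-- ===== Notes on version B (the rewrite author's own statement) =====
-- stated objective: alternative
-- what changed: B makes a single pass with a rolling-window accumulator (drop the window's first element, append the next token, record the window) instead of A's index loop that slices tokens[i:i+window_size] afresh for every i.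
-- outside the precondition, e.g. on compute_signature(['a'], 0): A returns {()}, B raises IndexError
import Mathlib
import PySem

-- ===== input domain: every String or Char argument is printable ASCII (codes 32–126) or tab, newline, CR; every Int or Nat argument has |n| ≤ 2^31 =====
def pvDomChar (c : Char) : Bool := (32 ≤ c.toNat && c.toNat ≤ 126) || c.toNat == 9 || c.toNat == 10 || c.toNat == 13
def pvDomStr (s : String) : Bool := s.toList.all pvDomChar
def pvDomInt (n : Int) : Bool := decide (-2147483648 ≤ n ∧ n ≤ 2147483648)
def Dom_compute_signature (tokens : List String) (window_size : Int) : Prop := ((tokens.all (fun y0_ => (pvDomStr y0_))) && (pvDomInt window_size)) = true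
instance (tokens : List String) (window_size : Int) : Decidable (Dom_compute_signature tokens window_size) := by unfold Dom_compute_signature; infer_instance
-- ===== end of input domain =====

-- B builds the shingle set in one pass with a rolling-window accumulator (drop the window's head,
-- append the next token, record the window) instead of A's index loop slicing each window; same cost.

-- ===== PORT A =====
def compute_signature (tokens : List String) (window_size : Int) : List (List String) :=
  if (tokens.length : Int) < window_size then [tokens]
  else
    -- for i in range(len(tokens) - window_size + 1): shingles.add(tuple(tokens[i:i+window_size]))
    (PySem.List.pyRange 0 ((tokens.length : Int) - window_size + 1) 1).foldl
      (fun s i => PySem.Set.add s (PySem.List.slice tokens (some i) (some (i + window_size))))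
      PySem.Set.empty

-- ===== PORT B =====
def compute_signature_alt (tokens : List String) (window_size : Int) : List (List String) :=
  if (tokens.length : Int) < window_size then [tokens]
  else
    -- window = list(tokens[:window_size]); shingles = {tuple(window)}
    let w0 := PySem.List.slice tokens none (some window_size)
    -- for tok in tokens[window_size:]: window.pop(0); window.append(tok); shingles.add(tuple(window))
    -- window.pop(0) followed by append(tok) is window.tail ++ [tok]; exact here since the window is
    -- nonempty on every input admitted by Pre_ (window_size ≥ 1).
    ((PySem.List.slice tokens (some window_size) none).foldl
      (fun (st : List (List String) × List String) tok =>
        let win := st.2.tail ++ [tok]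
        (PySem.Set.add st.1 win, win))
      (PySem.Set.add PySem.Set.empty w0, w0)).1

-- ===== PRECONDITION & SPEC =====
-- Pre_ excludes window_size ≤ 0, a nonsense window width no caller of a shingling signature would
-- specify: there A returns negative-slice suffix fragments while B's rolling window either raises
-- (pop from an empty window) or yields different fragments; neither value is specified on that corner.
def Pre_compute_signature (_tokens : List String) (window_size : Int) : Prop := 1 ≤ window_size
instance (tokens : List String) (window_size : Int) : Decidable (Pre_compute_signature tokens window_size) := by unfold Pre_compute_signature; infer_instance

def pvWitness_compute_signature : List String × Int := (["a", "b"], 1)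

def Spec_compute_signature (tokens : List String) (window_size : Int) (out : List (List String)) : Prop := out = compute_signature_alt tokens window_size
instance (tokens : List String) (window_size : Int) (out : List (List String)) : Decidable (Spec_compute_signature tokens window_size out) := by unfold Spec_compute_signature; infer_instance

-- ===== CLAIM (what is proved, stated in full; the proofs are below) =====
def Claim_equal_compute_signature : Prop := ∀ (tokens : List String) (window_size : Int), Dom_compute_signature tokens window_size → Pre_compute_signature tokens window_size → Spec_compute_signature tokens window_size (compute_signature tokens window_size)

-- ===== LEMMAS AND PROOFS =====

-- Sliding step: dropping the head of window k and appending tokens[k+w] gives window k+1.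
theorem window_slide {α : Type} (t : List α) (w k : Nat) (hw : 1 ≤ w) (h : k + w < t.length) :
    ((t.drop k).take w).tail ++ [t[k + w]] = (t.drop (k + 1)).take w := by
  obtain ⟨v, rfl⟩ : ∃ v, w = v + 1 := ⟨w - 1, by omega⟩
  have hk : k < t.length := by omega
  have e : k + (v + 1) = k + 1 + v := by omega
  rw [List.drop_eq_getElem_cons hk, List.take_succ_cons, List.tail_cons, List.take_add_one,
      List.getElem?_drop, List.getElem?_eq_getElem (by omega)]
  simp [e]

-- The rolling loop, started at window k, adds exactly windows k+1 … n-w to the accumulator.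
theorem roll_eq {α : Type} [DecidableEq α] (t : List α) (w : Nat) (hw : 1 ≤ w) :
    ∀ (k : Nat) (S : List (List α)), k + w ≤ t.length →
      ((t.drop (k + w)).foldl
        (fun (st : List (List α) × List α) tok =>
          let win := st.2.tail ++ [tok]
          (PySem.Set.add st.1 win, win))
        (S, (t.drop k).take w)).1
      = ((List.range (t.length - w - k)).map (fun j => (t.drop (k + 1 + j)).take w)).foldl
          PySem.Set.add S := by
  intro k S hk
  induction hm : t.length - w - k generalizing k S with
  | zero =>
    have hdrop : t.drop (k + w) = [] := by rw [List.drop_eq_nil_iff]; omega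
    simp [hdrop]
  | succ m ih =>
    have hlt : k + w < t.length := by omega
    have hdrop : t.drop (k + w) = t[k + w] :: t.drop (k + w + 1) := by
      rw [List.drop_eq_getElem_cons hlt]
    rw [hdrop, List.foldl_cons]
    simp only [window_slide t w k hw hlt]
    have hstep := ih (k + 1) (PySem.Set.add S ((t.drop (k + 1)).take w)) (by omega) (by omega)
    rw [show k + w + 1 = (k + 1) + w from by omega, hstep]
    rw [List.range_succ_eq_map, List.map_cons, List.foldl_cons, List.map_map]
    congr 1
    apply List.map_congr_left
    intro j _
    simp only [Function.comp]
    congr 2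
    omega

-- A's loop as Set.ofList of the window list
theorem A_eq_ofList (tokens : List String) (window_size : Int) (h : ¬ (tokens.length : Int) < window_size) :
    compute_signature tokens window_size =
      PySem.Set.ofList ((PySem.List.pyRange 0 ((tokens.length : Int) - window_size + 1) 1).map
        (fun i => PySem.List.slice tokens (some i) (some (i + window_size)))) := by
  rw [compute_signature, if_neg h, PySem.Set.ofList_eq_foldl, List.foldl_map]
  rfl

theorem compute_signature_spec_aux (tokens : List String) (window_size : Int)
    (hw : 1 ≤ window_size) :
    compute_signature tokens window_size = compute_signature_alt tokens window_size := by
  by_cases h : (tokens.length : Int) < window_size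
  · rw [compute_signature, compute_signature_alt, if_pos h, if_pos h]
  · obtain ⟨w, rfl⟩ : ∃ w : Nat, window_size = (w : Int) := ⟨window_size.toNat, by omega⟩
    have hw1 : 1 ≤ w := by exact_mod_cast hw
    have hwlen : w ≤ tokens.length := by exact_mod_cast not_lt.mp h
    rw [A_eq_ofList tokens w h, compute_signature_alt, if_neg h]
    -- A's window list is the sliding-window list
    have hwin : (PySem.List.pyRange 0 ((tokens.length : Int) - w + 1) 1).map
          (fun i => PySem.List.slice tokens (some i) (some (i + w)))
        = (List.range (tokens.length - w + 1)).map (fun k => (tokens.drop k).take w) := by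
      rw [PySem.List.pyRange_one, List.map_map]
      have hn : ((tokens.length : Int) - w + 1 - 0).toNat = tokens.length - w + 1 := by omega
      rw [hn]
      apply List.map_congr_left
      intro k _
      simp only [Function.comp, zero_add]
      rw [PySem.List.slice_natCast_add]
    rw [hwin]
    -- B's initial window and remainder
    rw [PySem.List.slice_to_natCast, PySem.List.slice_from_natCast]
    have hB := roll_eq tokens w hw1 0 (PySem.Set.add PySem.Set.empty ((tokens.drop 0).take w))
      (by omega)
    simp only [List.drop_zero, Nat.zero_add] at hB
    refine Eq.trans ?_ hB.symm
    -- fold A's ofList into the same foldl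
    rw [PySem.Set.ofList_eq_foldl]
    rw [List.range_succ_eq_map, List.map_cons, List.foldl_cons, List.map_map]
    congr 1
    simp only [Nat.sub_zero]
    apply List.map_congr_left
    intro j hj
    simp only [Function.comp_apply]
    congr 2
    omega

-- ===== VERDICT (by name: the statement is the Claim_ definition above) =====
theorem compute_signature_spec : Claim_equal_compute_signature := by
  intro tokens ws _ hpre
  exact compute_signature_spec_aux tokens ws hpre
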